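-- pv_equiv track=rewrite | github.com/KambliKritarth/Semester-VI | Projects/experiment 3 spcc/lexical_analyzer.py | count
-- ===== SOURCE A (Python) =====
-- def count(array_in):
--     count_dict = {}
--     for a in array_in:
--         if a[0] in count_dict:
--             count_dict[a[0]][0]+=1
--         else:
--             count_dict[a[0]]=[1,a[1]]
--     return count_dict
-- ===== SOURCE B (Python) =====
-- def count(array_in):
--     keys = list(dict.fromkeys(a[0] for a in array_in))
--     result = {}
--     for k in keys:
--         matches = [a[1] for a in array_in if a[0] == k]
--         result[k] = [len(matches), matches[0]]
--     return result
-- ===== Notes on version B (the rewrite author's own statement) =====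
-- stated objective: alternative
-- what changed: Replaces A's single accumulating pass with an increment-or-initialise dict by a key-directed nested-scan algorithm: first compute the distinct keys in first-occurrence order, then for each key rescan the whole input to collect its matches, deriving the count from len(matches) and the kept value from matches[0].
import Mathlib
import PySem

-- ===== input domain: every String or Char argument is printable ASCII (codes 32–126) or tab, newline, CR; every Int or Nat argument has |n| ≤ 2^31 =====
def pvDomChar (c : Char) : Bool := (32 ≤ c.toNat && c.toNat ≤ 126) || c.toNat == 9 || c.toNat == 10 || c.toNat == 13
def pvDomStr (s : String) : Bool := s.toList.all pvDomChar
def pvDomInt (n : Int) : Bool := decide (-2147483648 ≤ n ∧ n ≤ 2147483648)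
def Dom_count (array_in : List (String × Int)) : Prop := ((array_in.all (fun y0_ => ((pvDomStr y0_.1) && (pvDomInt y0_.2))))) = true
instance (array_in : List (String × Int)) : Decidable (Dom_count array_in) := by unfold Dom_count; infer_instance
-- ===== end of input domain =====

-- B trades A's single accumulating pass for a key-directed nested-scan algorithm (distinct keys first, then one rescan per key); alternative, same results.

-- ===== PORT A =====
-- A: one loop; on a seen key increment the stored pair's first slot, otherwise store [1, a[1]].
def count (array_in : List (String × Int)) : List (String × List Int) :=
  (array_in.foldl
    (fun d a =>
      if d.contains a.1 then
        -- count_dict[a[0]][0] += 1  (in-place head increment of the stored list)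
        d.modify a.1 [] (fun v => match v with | c :: rest => (c + 1) :: rest | [] => [])
      else
        d.insert a.1 [1, a.2])
    PySem.Dict.empty).items

-- ===== PORT B =====
-- B: compute the distinct keys in first-occurrence order (dict.fromkeys), then for each key
-- rescan the input collecting its ms; count = len(ms), kept value = ms[0].
def count_alt (array_in : List (String × Int)) : List (String × List Int) :=
  let keys := PySem.List.dedup (array_in.map (·.1))
  (keys.foldl
    (fun d k =>
      let ms := (array_in.filter (fun a => a.1 == k)).map (·.2)
      -- ms[0]: ms is nonempty since k is drawn from array_in's keys
      d.insert k [(ms.length : Int), ms.headD 0])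
    PySem.Dict.empty).items

-- ===== PRECONDITION & SPEC =====
def Spec_count (array_in : List (String × Int)) (out : List (String × List Int)) : Prop := out = count_alt array_in
instance (array_in : List (String × Int)) (out : List (String × List Int)) : Decidable (Spec_count array_in out) := by unfold Spec_count; infer_instance

-- ===== CLAIM (what is proved, stated in full; the proofs are below) =====
def Claim_equal_count : Prop := ∀ (array_in : List (String × Int)), Dom_count array_in → Spec_count array_in (count array_in)

-- ===== LEMMAS AND PROOFS =====

-- the value B associates with key k, over the full list l
def pvVal (l : List (String × Int)) (k : String) : List Int :=
  let ms := (l.filter (fun a => a.1 == k)).map (·.2)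
  [(ms.length : Int), ms.headD 0]

-- B's insert-fold over nodup fresh keys just appends the pairs
theorem pv_fold_insert_items (f : String → List Int) (keys : List String)
    (d : PySem.Dict String (List Int))
    (hfresh : ∀ k ∈ keys, d.contains k = false) (hnd : keys.Nodup) :
    (keys.foldl (fun d k => d.insert k (f k)) d).items
      = d.items ++ keys.map (fun k => (k, f k)) := by
  induction keys generalizing d with
  | nil => simp
  | cons k ks ih =>
    have hk : d.contains k = false := hfresh k (by simp)
    have hins : (d.insert k (f k)).items = d.items ++ [(k, f k)] :=
      PySem.Dict.items_insert_of_not_contains _ _ hk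
    simp only [List.foldl_cons]
    rw [ih]
    · rw [hins]; simp
    · intro k' hk'
      have hne : k' ≠ k := by
        rcases List.nodup_cons.mp hnd with ⟨hnotin, _⟩
        intro h; exact hnotin (h ▸ hk')
      have hk'd : d.contains k' = false := hfresh k' (by simp [hk'])
      simp only [PySem.Dict.contains] at hk'd ⊢
      rw [hins]
      simp [List.any_append, hk'd]
      exact fun h => hne h.symm
    · exact (List.nodup_cons.mp hnd).2

-- dedup over a snoc
theorem pv_dedup_append (xs : List String) (x : String) :
    PySem.List.dedup (xs ++ [x])
      = if x ∈ xs then PySem.List.dedup xs else PySem.List.dedup xs ++ [x] := by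
  simp only [PySem.List.dedup_eq_ofList]
  rw [PySem.Set.ofList_eq_foldl, PySem.Set.ofList_eq_foldl, List.foldl_append]
  simp only [List.foldl_cons, List.foldl_nil, PySem.Set.add]
  have hc : (List.foldl PySem.Set.add [] xs).contains x = decide (x ∈ xs) := by
    rw [← PySem.Set.ofList_eq_foldl]
    simp [PySem.Set.mem_ofList]
  rw [hc]
  by_cases h : x ∈ xs <;> simp [h]

-- find? of a key among pairs produced by mapping over the keys
theorem pv_find?_map (keys : List String) (f : String → List Int) (s : String)
    (hs : s ∈ keys) :
    (keys.map (fun k => (k, f k))).find? (fun p => p.1 == s) = some (s, f s) := by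
  induction keys with
  | nil => simp at hs
  | cons k ks ih =>
    by_cases h : k = s
    · subst h; simp
    · have hs' : s ∈ ks := by
        rcases List.mem_cons.mp hs with h' | h'
        · exact absurd h'.symm h
        · exact h'
      simp [h, ih hs']

-- key membership gives a nonempty filter
theorem pv_filter_ne_nil (l : List (String × Int)) (s : String) (h : s ∈ l.map (·.1)) :
    l.filter (fun a => a.1 == s) ≠ [] := by
  rcases List.mem_map.mp h with ⟨a, ha, hfst⟩
  intro hnil
  have : a ∈ l.filter (fun a => a.1 == s) := List.mem_filter.mpr ⟨ha, by simp [hfst]⟩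
  simp [hnil] at this

-- pvVal over a snoc
theorem pv_val_append_self (l : List (String × Int)) (s : String) (n : Int)
    (h : s ∈ l.map (·.1)) :
    pvVal (l ++ [(s, n)]) s
      = match pvVal l s with | c :: rest => (c + 1) :: rest | [] => [] := by
  have hne : l.filter (fun a => a.1 == s) ≠ [] := pv_filter_ne_nil l s h
  unfold pvVal
  cases hf : l.filter (fun a => a.1 == s) with
  | nil => exact absurd hf hne
  | cons p ps =>
    simp [List.filter_append, hf]

theorem pv_val_append_ne (l : List (String × Int)) (s k : String) (n : Int)
    (h : k ≠ s) :
    pvVal (l ++ [(s, n)]) k = pvVal l k := by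
  unfold pvVal
  simp [List.filter_append, Ne.symm h]

-- characterisation of A's loop: its dict's items list the distinct keys in first-occurrence
-- order, each mapped to the per-key value over the whole input
theorem pv_A_items (l : List (String × Int)) :
    (l.foldl
      (fun d a =>
        if d.contains a.1 then
          d.modify a.1 [] (fun v => match v with | c :: rest => (c + 1) :: rest | [] => [])
        else d.insert a.1 [1, a.2])
      (PySem.Dict.empty : PySem.Dict String (List Int))).items
    = (PySem.List.dedup (l.map (·.1))).map (fun k => (k, pvVal l k)) := by
  induction l using List.reverseRecOn with
  | nil => simp [PySem.Dict.empty, PySem.List.dedup]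
  | append_singleton l a ih =>
    obtain ⟨s, n⟩ := a
    rw [List.foldl_append]
    simp only [List.foldl_cons, List.foldl_nil]
    set F := l.foldl
      (fun d a =>
        if d.contains a.1 then
          d.modify a.1 [] (fun v => match v with | c :: rest => (c + 1) :: rest | [] => [])
        else d.insert a.1 [1, a.2])
      (PySem.Dict.empty : PySem.Dict String (List Int)) with hF
    have hitems : F.items = (PySem.List.dedup (l.map (·.1))).map (fun k => (k, pvVal l k)) := ih
    have hmapfst : (l ++ [(s, n)]).map (·.1) = l.map (·.1) ++ [s] := by simp
    have hcontains : F.contains s = decide (s ∈ l.map (·.1)) := by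
      simp only [PySem.Dict.contains, hitems, List.any_map]
      have hpred : ((fun p : String × List Int => p.1 == s) ∘ fun k => (k, pvVal l k))
          = fun k : String => k == s := rfl
      rw [hpred]
      by_cases h : s ∈ l.map (·.1)
      · simp only [h, decide_true, List.any_eq_true]
        exact ⟨s, (PySem.List.mem_dedup _ _).mpr h, by simp⟩
      · simp only [h, decide_false, List.any_eq_false]
        intro k hk
        have hkmem := (PySem.List.mem_dedup _ _).mp hk
        simp only [beq_iff_eq]
        intro he; exact h (he ▸ hkmem)
    by_cases hmem : s ∈ l.map (·.1)
    · -- seen key: A overwrites in place, keys unchanged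
      rw [if_pos (by rw [hcontains]; simpa using hmem)]
      have hsmem : s ∈ PySem.List.dedup (l.map (·.1)) := (PySem.List.mem_dedup _ _).mpr hmem
      have hget : F.getD s [] = pvVal l s := by
        simp only [PySem.Dict.getD, PySem.Dict.get?, hitems, pv_find?_map _ _ _ hsmem]
        rfl
      have hcon : F.contains s = true := by rw [hcontains]; simpa using hmem
      simp only [PySem.Dict.modify, hget]
      rw [PySem.Dict.items_insert_of_contains _ _ hcon, hitems, List.map_map,
          hmapfst, pv_dedup_append, if_pos hmem]
      apply List.map_congr_left
      intro k hk
      by_cases hks : k = s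
      · subst hks
        simp [Function.comp, pv_val_append_self l k n hmem]
      · simp [Function.comp, hks, pv_val_append_ne l s k n hks]
    · -- fresh key: A appends (s, [1, n])
      rw [if_neg (by rw [hcontains]; simpa using hmem)]
      have hcon : F.contains s = false := by rw [hcontains]; simpa using hmem
      rw [PySem.Dict.items_insert_of_not_contains _ _ hcon, hitems,
          hmapfst, pv_dedup_append, if_neg hmem, List.map_append]
      congr 1
      · apply List.map_congr_left
        intro k hk
        have hks : k ≠ s := by
          intro h; subst h
          exact hmem ((PySem.List.mem_dedup _ _).mp hk)
        rw [pv_val_append_ne l s k n hks]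
      · have hfilter : l.filter (fun a => a.1 == s) = [] := by
          rw [List.filter_eq_nil_iff]
          intro a ha hb
          exact hmem (List.mem_map.mpr ⟨a, ha, by simpa using hb⟩)
        have hfind : List.find? (fun a => a.1 == s) l = none :=
          List.find?_eq_none.mpr (by
            intro a ha
            have := List.filter_eq_nil_iff.mp hfilter a ha
            simpa using this)
        simp [pvVal, List.filter_append, List.filter_cons, hfilter, hfind]

-- ===== VERDICT (by name: the statement is the Claim_ definition above) =====
theorem count_spec : Claim_equal_count := by
  intro array_in _
  unfold Spec_count count count_alt
  rw [pv_A_items]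
  show _ = ((PySem.List.dedup (array_in.map (·.1))).foldl
      (fun d k => d.insert k (pvVal array_in k))
      (PySem.Dict.empty : PySem.Dict String (List Int))).items
  rw [pv_fold_insert_items (fun k => pvVal array_in k) _ PySem.Dict.empty
        (fun k _ => rfl) (PySem.List.nodup_dedup _)]
  simp [PySem.Dict.empty]
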